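-- pv_equiv track=rewrite | github.com/DeepDriveMD/DeepDriveMD-pipeline | deepdrivemd/sim/nwchem/ase_nwchem.py | _make_molecule_name
-- ===== SOURCE A (Python) =====
-- def _make_molecule_name(tuples: list) -> str:
--     '''
--     DeePMD needs a kind of bruto formula for the molecule as a name
--
--     The way DeePMD stores its training data we need separate directories
--     for every different "bruto formula" in the training set.
--
--     To generate this name we need to count how often every element appears
--     in the atom list. Then we need to string the chemical symbols with their
--     counts together in a string to generate the name.
--
--     Note that for formaldehyde this function will produce h2c1o1. While this
--     will likely annoy chemists we have to it this way otherwise you cannot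
--     distinguish between different molecules like C Au and Ca U, now these
--     would produce c1au1 and ca1u1 which clearly are different (essentially
--     we use the count BOTH to report the count AND as a separator between
--     elements).
--     '''
--     # There are 118 chemical elements but the atomic numbers are base 1 instead of base 0
--     symbols = [""] * 119
--     counts = [0] * 119
--     for atm_tuple in tuples:
--         index, symbol, atomicno = atm_tuple
--         symbols[atomicno] = symbol.lower()
--         counts[atomicno] += 1
--     result = ""
--     for ii in range(119):
--         if counts[ii] > 0:
--             result += symbols[ii] + str(counts[ii])
--     return result
-- ===== SOURCE B (Python) =====
-- def _make_molecule_name(tuples: list) -> str: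
--     '''Bruto-formula name: distinct atomic numbers sorted, then for each one
--     a rescan of the atom list yields its count and the last symbol seen.'''
--     keys = sorted({atomicno for _index, _symbol, atomicno in tuples})
--     parts = []
--     for k in keys:
--         syms = [symbol for _index, symbol, atomicno in tuples if atomicno == k]
--         parts.append(syms[-1].lower() + str(len(syms)))
--     return "".join(parts)
-- ===== Notes on version B (the rewrite author's own statement) =====
-- stated objective: alternative
-- what changed: Replaces the fixed 119-slot symbol/count bucket arrays (a counting sort via array indexing) with a set of the distinct atomic numbers, an explicit sort of that set, and one rescan of the tuple list per distinct atomic number to obtain its count and last symbol; trades A's O(n) counting pass for O(k*n) per-key rescans.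
-- intended difference: On inputs mixing negative and nonnegative atomic numbers, Python's negative-index wraparound makes A fold a negative atomic number a into bucket 119+a, interleaving or even merging it with genuine elements near the top of the table, while B counts it under its own atomic number and sorts it before the nonnegative ones, which is the intended per-element count. — e.g. on _make_molecule_name([(0, "x", -1), (1, "o", 8)]): A returns "o1x1", B returns "x1o1"
import Mathlib
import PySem

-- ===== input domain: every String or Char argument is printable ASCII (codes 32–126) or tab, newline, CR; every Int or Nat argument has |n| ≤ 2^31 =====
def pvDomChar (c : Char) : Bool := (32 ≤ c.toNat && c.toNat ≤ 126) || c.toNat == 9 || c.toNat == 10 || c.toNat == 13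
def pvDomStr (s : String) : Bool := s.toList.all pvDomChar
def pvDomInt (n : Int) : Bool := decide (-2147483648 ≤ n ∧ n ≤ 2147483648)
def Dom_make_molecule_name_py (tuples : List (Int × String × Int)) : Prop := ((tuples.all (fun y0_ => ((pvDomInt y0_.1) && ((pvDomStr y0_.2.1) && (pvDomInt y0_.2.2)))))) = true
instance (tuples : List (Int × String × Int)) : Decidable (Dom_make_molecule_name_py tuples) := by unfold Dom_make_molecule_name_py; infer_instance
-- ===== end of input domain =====

-- B replaces A's 119-slot symbol/count bucket arrays (a counting sort via array indexing)
-- by: the set of distinct atomic numbers, an explicit sort of that set, and one rescan of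
-- the tuple list per distinct atomic number for its count and last symbol (alternative).

-- ===== PORT A =====
def make_molecule_name_py (tuples : List (Int × String × Int)) : String :=
  -- symbols = [""] * 119 ; counts = [0] * 119 ; item assignment at index atomicno.
  -- Python list indexing: a negative index counts from the end of the 119-slot list
  -- (index ≤ -120 or ≥ 119 raises IndexError; those inputs are outside Pre_).
  let st := tuples.foldl
    (fun (st : List String × List Int) atm_tuple =>
      (st.1.set (if atm_tuple.2.2 < 0 then atm_tuple.2.2 + 119 else atm_tuple.2.2).toNat
         (PySem.Str.lower atm_tuple.2.1),
       st.2.set (if atm_tuple.2.2 < 0 then atm_tuple.2.2 + 119 else atm_tuple.2.2).toNat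
         (st.2.getD (if atm_tuple.2.2 < 0 then atm_tuple.2.2 + 119 else atm_tuple.2.2).toNat 0 + 1)))
    (List.replicate 119 "", List.replicate 119 (0 : Int))
  -- for ii in range(119): if counts[ii] > 0: result += symbols[ii] + str(counts[ii])
  (PySem.List.pyRange 0 119).foldl
    (fun result ii =>
      if st.2.getD ii.toNat 0 > 0 then
        result ++ (st.1.getD ii.toNat "" ++ PySem.Int.toStr (st.2.getD ii.toNat 0))
      else result) ""

-- ===== PORT B =====
-- loop body of B: syms = [s for …, s, a in tuples if a == k]; syms[-1].lower() + str(len(syms))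
def pvPart (tuples : List (Int × String × Int)) (k : Int) : String :=
  let syms := (tuples.filter (fun t => t.2.2 == k)).map (fun t => t.2.1)
  PySem.Str.lower ((PySem.List.pyGet? syms (-1)).getD "") ++ PySem.Int.toStr (syms.length : Int)

def make_molecule_name_py_alt (tuples : List (Int × String × Int)) : String :=
  -- keys = sorted({atomicno for _i, _s, atomicno in tuples})
  let keys := PySem.List.sorted (PySem.Set.ofList (tuples.map (fun t => t.2.2))) (fun a => a)
  -- for k in keys: syms = [s for …, s, a in tuples if a == k]; parts.append(syms[-1].lower() + str(len(syms)))
  let parts := keys.foldl (fun (parts : List String) k => parts ++ [pvPart tuples k]) []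
  PySem.Str.join "" parts

-- ===== PRECONDITION & SPEC =====
-- Pre_ admits exactly the inputs on which A returns: every atomic number is a valid
-- (possibly negative, then wrapped) index into A's 119-slot lists; outside -119..118
-- A raises IndexError (and B also returns there, but A's exception on such corrupt
-- input is the behaviour to keep, so those inputs are simply outside the claim).
def Pre_make_molecule_name_py (tuples : List (Int × String × Int)) : Prop :=
  ∀ t ∈ tuples, -119 ≤ t.2.2 ∧ t.2.2 ≤ 118
instance (tuples : List (Int × String × Int)) : Decidable (Pre_make_molecule_name_py tuples) := by unfold Pre_make_molecule_name_py; infer_instance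
def pvWitness_make_molecule_name_py : (List (Int × String × Int)) :=
  [(0, "H", 1), (1, "h", 1), (2, "O", 8)]

-- On inputs mixing negative and nonnegative atomic numbers, Python's negative-index
-- wraparound makes A fold a negative atomic number a into bucket 119+a, interleaving or
-- even merging it with genuine elements near the top of the table, while B counts it
-- under its own atomic number and sorts it before the nonnegative ones, which is the
-- intended per-element count.
def D_make_molecule_name_py (tuples : List (Int × String × Int)) : Prop :=
  (∃ t ∈ tuples, t.2.2 < 0) ∧ (∃ t ∈ tuples, 0 ≤ t.2.2)
instance (tuples : List (Int × String × Int)) : Decidable (D_make_molecule_name_py tuples) := by unfold D_make_molecule_name_py; infer_instance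

def Spec_make_molecule_name_py (tuples : List (Int × String × Int)) (out : String) : Prop := ¬ D_make_molecule_name_py tuples → out = make_molecule_name_py_alt tuples
instance (tuples : List (Int × String × Int)) (out : String) : Decidable (Spec_make_molecule_name_py tuples out) := by unfold Spec_make_molecule_name_py; infer_instance

def pvDiffWitness_make_molecule_name_py : (List (Int × String × Int)) :=
  [(0, "x", -1), (1, "o", 8)]
def pvDiffWitnessOut_make_molecule_name_py : String × String := ("o1x1", "x1o1")

-- ===== CLAIM (what is proved, stated in full; the proofs are below) =====
def Claim_unchanged_make_molecule_name_py : Prop := ∀ (tuples : List (Int × String × Int)), Dom_make_molecule_name_py tuples → Pre_make_molecule_name_py tuples → Spec_make_molecule_name_py tuples (make_molecule_name_py tuples)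
def Claim_changed_make_molecule_name_py : Prop := Dom_make_molecule_name_py (pvDiffWitness_make_molecule_name_py) ∧ Pre_make_molecule_name_py (pvDiffWitness_make_molecule_name_py) ∧ D_make_molecule_name_py (pvDiffWitness_make_molecule_name_py) ∧ make_molecule_name_py (pvDiffWitness_make_molecule_name_py) = pvDiffWitnessOut_make_molecule_name_py.1 ∧ make_molecule_name_py_alt (pvDiffWitness_make_molecule_name_py) = pvDiffWitnessOut_make_molecule_name_py.2 ∧ pvDiffWitnessOut_make_molecule_name_py.1 ≠ pvDiffWitnessOut_make_molecule_name_py.2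

-- ===== LEMMAS AND PROOFS =====

-- count and last-lowercased-symbol of the atomic number (i - off) in the tuple list
-- (off = 0 when every atomic number is nonnegative, 119 when every one is negative:
-- A's bucket index is then atomic number + off)
def pvCnt (off : Int) (ts : List (Int × String × Int)) (i : Nat) : Nat :=
  ts.countP (fun t => t.2.2 == (i : Int) - off)
def pvSym (off : Int) (ts : List (Int × String × Int)) (i : Nat) : String :=
  PySem.Str.lower ((((ts.filter (fun t => t.2.2 == (i : Int) - off)).map (fun t => t.2.1)).getLast?).getD "")

-- A's loop state after consuming ts, expressed through pvCnt/pvSym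
def pvInv (off : Int) (ts : List (Int × String × Int)) (st : List String × List Int) : Prop :=
  st.1.length = 119 ∧ st.2.length = 119 ∧
  (∀ i : Nat, i < 119 → st.2.getD i 0 = (pvCnt off ts i : Int)) ∧
  (∀ i : Nat, i < 119 → st.1.getD i "" = pvSym off ts i)

lemma pv_getD_replicate {α : Type} (n i : Nat) (a d : α) :
    (List.replicate n a).getD i d = if i < n then a else d := by
  rw [List.getD_eq_getElem?_getD, List.getElem?_replicate]
  split <;> simp_all

lemma pv_getD_set {α : Type} (l : List α) (n i : Nat) (v d : α) :
    (l.set n v).getD i d = if i = n ∧ n < l.length then v else l.getD i d := by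
  rw [List.getD_eq_getElem?_getD, List.getD_eq_getElem?_getD, List.getElem?_set]
  rcases eq_or_ne n i with rfl | hne
  · by_cases hl : n < l.length
    · simp [hl]
    · rw [List.getElem?_eq_none (l := l) (i := n) (by omega)]
      simp [hl]
  · rw [if_neg hne, if_neg (fun hc => hne hc.1.symm)]

lemma pvInv_loop (off : Int) (hoff : off = 0 ∨ off = 119)
    (ts : List (Int × String × Int)) (hts : ∀ t ∈ ts, -off ≤ t.2.2 ∧ t.2.2 < 119 - off) :
    pvInv off ts
      (ts.foldl (fun st t =>
        (st.1.set (if t.2.2 < 0 then t.2.2 + 119 else t.2.2).toNat (PySem.Str.lower t.2.1),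
         st.2.set (if t.2.2 < 0 then t.2.2 + 119 else t.2.2).toNat
           (st.2.getD (if t.2.2 < 0 then t.2.2 + 119 else t.2.2).toNat 0 + 1)))
        (List.replicate 119 "", List.replicate 119 (0 : Int))) := by
  induction ts using List.reverseRecOn with
  | nil =>
      refine ⟨by simp, by simp, ?_, ?_⟩
      · intro i hi
        rw [List.foldl_nil, pv_getD_replicate, if_pos hi]
        simp [pvCnt]
      · intro i hi
        rw [List.foldl_nil, pv_getD_replicate, if_pos hi]
        simp [pvSym]
        rfl
  | append_singleton ts t ih =>
      obtain ⟨h1, h2, h3, h4⟩ := ih (fun x hx => hts x (by simp [hx]))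
      have htt := hts t (by simp)
      have hidx : (if t.2.2 < 0 then t.2.2 + 119 else t.2.2) = t.2.2 + off := by
        rcases hoff with rfl | rfl <;> split_ifs <;> omega
      set b := (t.2.2 + off).toNat with hbdef
      have hb : b < 119 := by omega
      have hbc : (b : Int) = t.2.2 + off := by omega
      rw [List.foldl_append, List.foldl_cons, List.foldl_nil, hidx]
      refine ⟨by rw [List.length_set]; exact h1, by rw [List.length_set]; exact h2, ?_, ?_⟩
      · intro i hi
        rcases eq_or_ne i b with rfl | hne
        · have hp : (t.2.2 == (b : Int) - off) = true := by
            simp only [beq_iff_eq]; omega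
          have hcnt : pvCnt off (ts ++ [t]) b = pvCnt off ts b + 1 := by
            simp [pvCnt, List.countP_append, hp]
          rw [pv_getD_set, if_pos ⟨rfl, by omega⟩, hcnt, h3 b hb]
          push_cast; ring
        · have hp : (t.2.2 == (i : Int) - off) = false := by
            simp only [beq_eq_false_iff_ne, ne_eq]; omega
          have hcnt : pvCnt off (ts ++ [t]) i = pvCnt off ts i := by
            simp [pvCnt, List.countP_append, hp]
          rw [pv_getD_set, if_neg (fun hc => hne hc.1), hcnt, h3 i hi]
      · intro i hi
        rcases eq_or_ne i b with rfl | hne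
        · have hp : (fun (t' : Int × String × Int) => t'.2.2 == (b : Int) - off) t = true := by
            simp only [beq_iff_eq]; omega
          rw [pv_getD_set, if_pos ⟨rfl, by omega⟩]
          simp [pvSym, List.filter_append, hp]
        · have hp : (fun (t' : Int × String × Int) => t'.2.2 == (i : Int) - off) t = false := by
            simp only [beq_eq_false_iff_ne, ne_eq]; omega
          rw [pv_getD_set, if_neg (fun hc => hne hc.1), h4 i hi]
          simp [pvSym, List.filter_append, hp]

-- the sorted distinct atomic numbers are exactly the positive-count bucket indices,
-- shifted back by off, in increasing order
lemma pv_sorted_keys (off : Int) (ts : List (Int × String × Int))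
    (hts : ∀ t ∈ ts, -off ≤ t.2.2 ∧ t.2.2 < 119 - off) :
    PySem.List.sorted (PySem.Set.ofList (ts.map (fun t => t.2.2))) (fun a => a)
      = ((List.range 119).filter (fun i => decide (0 < pvCnt off ts i))).map
          (fun i : Nat => (i : Int) - off) := by
  apply PySem.List.sorted_eq_of_perm_of_pairwise_lt
  · rw [List.perm_ext_iff_of_nodup
      ((List.nodup_range.filter _).map (fun a b hab => by omega)) (PySem.Set.nodup_ofList _)]
    intro x
    constructor
    · intro hx
      obtain ⟨i, hif, rfl⟩ := List.mem_map.1 hx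
      obtain ⟨hir, hip⟩ := List.mem_filter.1 hif
      obtain ⟨t, htm, hpt⟩ := List.countP_pos_iff.1 (of_decide_eq_true hip)
      exact (PySem.Set.mem_ofList _ _).2 (List.mem_map.2 ⟨t, htm, (beq_iff_eq.1 hpt)⟩)
    · intro hx
      obtain ⟨t, htm, rfl⟩ := List.mem_map.1 ((PySem.Set.mem_ofList _ _).1 hx)
      obtain ⟨hx0, hx119⟩ := hts t htm
      have hxe : ((t.2.2 + off).toNat : Int) - off = t.2.2 := by omega
      refine List.mem_map.2 ⟨(t.2.2 + off).toNat,
        List.mem_filter.2 ⟨List.mem_range.2 (by omega), ?_⟩, hxe⟩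
      exact decide_eq_true (List.countP_pos_iff.2 ⟨t, htm, beq_iff_eq.2 (by omega)⟩)
  · rw [List.pairwise_map]
    exact List.Pairwise.imp (fun hab => by omega) (List.pairwise_lt_range.filter _)

-- string folds, seen through toList
lemma pv_foldl_append_toList {α : Type} (l : List α) (f : α → String) (acc : String) :
    (l.foldl (fun r x => r ++ f x) acc).toList
      = acc.toList ++ (l.map (fun x => (f x).toList)).flatten := by
  induction l generalizing acc with
  | nil => simp
  | cons x xs ih => simp [ih, String.toList_append]

lemma pv_join_nil_flatten (xss : List (List Char)) :
    PySem.Chars.join [] xss = xss.flatten := by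
  induction xss with
  | nil => rfl
  | cons x xs ih =>
    cases xs with
    | nil => simp [PySem.Chars.join_singleton [] x]
    | cons y ys =>
      rw [PySem.Chars.join_cons_cons, ih]
      simp

set_option maxHeartbeats 2000000 in
lemma pv_final (off : Int) (ts : List (Int × String × Int)) (st : List String × List Int)
    (hts : ∀ t ∈ ts, -off ≤ t.2.2 ∧ t.2.2 < 119 - off) (h : pvInv off ts st) :
    (PySem.List.pyRange 0 119).foldl
      (fun result ii =>
        if st.2.getD ii.toNat 0 > 0 then
          result ++ (st.1.getD ii.toNat "" ++ PySem.Int.toStr (st.2.getD ii.toNat 0))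
        else result) ""
    = make_molecule_name_py_alt ts := by
  obtain ⟨h1, h2, h3, h4⟩ := h
  unfold make_molecule_name_py_alt
  have h119 : (119 : Int) = ((119 : Nat) : Int) := by norm_num
  rw [h119, PySem.List.pyRange_zero_natCast, List.foldl_map]
  simp only [Int.toNat_natCast]
  rw [PySem.List.foldl_ite_eq_foldl_filter (fun k => 0 < st.2.getD k 0)
    (fun r k => r ++ (st.1.getD k "" ++ PySem.Int.toStr (st.2.getD k 0)))]
  rw [PySem.List.foldl_append_singleton_eq_map, pv_sorted_keys off ts hts]
  have hfeq : (List.range 119).filter (fun i => decide (0 < st.2.getD i 0))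
      = (List.range 119).filter (fun i => decide (0 < pvCnt off ts i)) := by
    apply List.filter_congr
    intro i hi
    have := h3 i (List.mem_range.1 hi)
    simp only [this]
    simp
  rw [hfeq]
  refine String.toList_inj.mp ?_
  rw [pv_foldl_append_toList, PySem.Str.toList_join]
  simp only [String.toList_empty, List.nil_append, List.map_map]
  rw [pv_join_nil_flatten]
  congr 1
  apply List.map_congr_left
  intro i hik
  obtain ⟨hir, hip⟩ := List.mem_filter.1 hik
  have hilt : i < 119 := List.mem_range.1 hir
  have hsyms : ((ts.filter (fun t => t.2.2 == (i : Int) - off)).map (fun t => t.2.1)).length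
      = pvCnt off ts i := by
    simp [pvCnt, List.countP_eq_length_filter]
  simp only [Function.comp, pvPart, h3 i hilt, h4 i hilt, pvSym,
    PySem.List.pyGet?_neg_one, hsyms]

-- ===== VERDICT (by name: the statement is the Claim_ definition above) =====
theorem make_molecule_name_py_spec : Claim_unchanged_make_molecule_name_py := by
  intro tuples _ hpre hnd
  by_cases hneg : ∃ t ∈ tuples, t.2.2 < 0
  · -- some atomic number is negative, hence (¬ D_) all are: bucket = atomicno + 119
    have hall : ∀ t ∈ tuples, -(119:Int) ≤ t.2.2 ∧ t.2.2 < 119 - 119 := by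
      intro t htm
      have hnn : ¬ (0 ≤ t.2.2) := by
        intro hge
        exact hnd ⟨hneg, ⟨t, htm, hge⟩⟩
      exact ⟨(hpre t htm).1, by omega⟩
    exact pv_final 119 tuples _ hall (pvInv_loop 119 (Or.inr rfl) tuples hall)
  · -- every atomic number is nonnegative, bucket = atomicno
    have hall : ∀ t ∈ tuples, -(0:Int) ≤ t.2.2 ∧ t.2.2 < 119 - 0 := by
      intro t htm
      have hnn : ¬ (t.2.2 < 0) := fun hlt => hneg ⟨t, htm, hlt⟩
      have hb := (hpre t htm).2
      exact ⟨by omega, by omega⟩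
    exact pv_final 0 tuples _ hall (pvInv_loop 0 (Or.inl rfl) tuples hall)

theorem make_molecule_name_py_changed : Claim_changed_make_molecule_name_py := by
  unfold Claim_changed_make_molecule_name_py; decide
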